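-- pv_equiv track=rewrite | github.com/LuisCarlosAlvaradoG/DDA02024 | Scripts_Profe/00_Flujos_y_Pseudocodigo.py | count_positive_until_zero
-- ===== SOURCE A (Python) =====
-- def count_positive_until_zero(sequence: list[int]) -> int:
--     count = 0
--     for x in sequence:
--         if x == 0:
--             break
--         if x > 0:
--             count += 1
--     return count
-- ===== SOURCE B (Python) =====
-- def count_positive_until_zero(sequence: list[int]) -> int:
--     cutoff = sequence.index(0) if 0 in sequence else len(sequence)
--     return sum(1 for x in sequence[:cutoff] if x > 0)
-- ===== Notes on version B (the rewrite author's own statement) =====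
-- stated objective: alternative
-- what changed: Replaced the single fused loop with early break and inline counter by a find-the-boundary-then-count decomposition: first locate the first zero (or the list end), then sum positives over that prefix.
import Mathlib
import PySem

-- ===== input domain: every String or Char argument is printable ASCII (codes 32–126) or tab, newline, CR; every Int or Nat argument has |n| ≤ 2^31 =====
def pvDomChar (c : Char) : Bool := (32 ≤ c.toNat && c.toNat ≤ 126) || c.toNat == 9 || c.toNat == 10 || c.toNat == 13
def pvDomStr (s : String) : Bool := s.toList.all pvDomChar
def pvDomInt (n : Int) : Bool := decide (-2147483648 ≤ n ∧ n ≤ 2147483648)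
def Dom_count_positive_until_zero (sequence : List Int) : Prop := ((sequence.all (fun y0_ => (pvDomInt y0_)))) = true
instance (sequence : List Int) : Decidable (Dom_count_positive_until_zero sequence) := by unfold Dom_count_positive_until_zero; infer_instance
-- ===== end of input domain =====

-- B replaces A's fused break-loop by a find-first-zero-then-count-positives decomposition (alternative; same return value, similar cost).
-- ===== PORT A =====
-- A: fused loop with early break at the first zero and an inline positive counter.
def count_positive_until_zero_go (xs : List Int) (count : Int) : Int :=
  match xs with
  | [] => count
  | x :: rest =>
    if x = 0 then count
    else count_positive_until_zero_go rest (if x > 0 then count + 1 else count)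

def count_positive_until_zero (sequence : List Int) : Int :=
  count_positive_until_zero_go sequence 0

-- ===== PORT B =====
-- B: locate the first zero (or the end) first, then count positives in that prefix.
def count_positive_until_zero_alt (sequence : List Int) : Int :=
  let cutoff : Nat :=
    match PySem.List.index? sequence 0 with
    | some i => i
    | none => sequence.length
  (sequence.take cutoff).foldl (fun acc x => if x > 0 then acc + 1 else acc) 0

-- ===== PRECONDITION & SPEC =====
def Spec_count_positive_until_zero (sequence : List Int) (out : Int) : Prop := out = count_positive_until_zero_alt sequence
instance (sequence : List Int) (out : Int) : Decidable (Spec_count_positive_until_zero sequence out) := by unfold Spec_count_positive_until_zero; infer_instance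

-- ===== CLAIM (what is proved, stated in full; the proofs are below) =====
def Claim_equal_count_positive_until_zero : Prop := ∀ (sequence : List Int), Dom_count_positive_until_zero sequence → Spec_count_positive_until_zero sequence (count_positive_until_zero sequence)

-- ===== LEMMAS AND PROOFS =====

-- ===== VERDICT (by name: the statement is the Claim_ definition above) =====
theorem foldl_countP (l : List Int) (a : Int) :
    l.foldl (fun acc x => if x > 0 then acc + 1 else acc) a
      = a + ((l.countP (fun x => decide (x > 0)) : Nat) : Int) := by
  induction l generalizing a with
  | nil => simp
  | cons y tl ih =>
    rw [List.foldl_cons, ih, List.countP_cons]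
    by_cases hy : y > 0 <;> simp [hy] <;> push_cast <;> ring

theorem go_spec (xs : List Int) (c : Int) :
    count_positive_until_zero_go xs c =
      c + (((xs.takeWhile (fun x => x ≠ 0)).countP (fun x => decide (x > 0)) : Nat) : Int) := by
  induction xs generalizing c with
  | nil => simp [count_positive_until_zero_go]
  | cons x rest ih =>
    rw [count_positive_until_zero_go]
    by_cases hx : x = 0
    · simp [hx, List.takeWhile_cons]
    · have hc : decide (x ≠ 0) = true := by simp [hx]
      rw [if_neg hx, ih, List.takeWhile_cons]
      simp only [hc, if_true]
      rw [List.countP_cons]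
      by_cases hp : x > 0 <;> simp [hp] <;> push_cast <;> ring

theorem take_cutoff_eq (sequence : List Int) :
    (sequence.take (match PySem.List.index? sequence 0 with
      | some i => i
      | none => sequence.length)) = sequence.takeWhile (fun x => x ≠ 0) := by
  induction sequence with
  | nil => simp
  | cons x rest ih =>
    by_cases hx : x = 0
    · subst hx
      rw [PySem.List.index?_cons_self]
      simp [List.takeWhile_cons]
    · rw [PySem.List.index?_cons_of_ne rest hx]
      cases h : PySem.List.index? rest 0 with
      | some i =>
        rw [h] at ih
        simp [List.takeWhile_cons, hx, ih]
      | none =>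
        rw [h] at ih
        simp [List.takeWhile_cons, hx, ih]

theorem count_positive_until_zero_spec : Claim_equal_count_positive_until_zero := by
  intro sequence _
  show count_positive_until_zero sequence = count_positive_until_zero_alt sequence
  rw [count_positive_until_zero, go_spec, count_positive_until_zero_alt]
  simp only [take_cutoff_eq]
  rw [foldl_countP]
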